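-- pv_equiv track=rewrite | github.com/RafaelDiasCampos/Leaked-Passwords-Database-Importer | databaseConnector.py | mergeDocuments
-- ===== SOURCE A (Python) =====
-- def mergeDocuments(documents):
--     mergedDocument = {}
--
--     for document in documents:
--         for field in document:
--             if field == "_id":
--                 continue
--             if field not in mergedDocument:
--                 mergedDocument[field] = []
--             mergedDocument[field] += document[field]
--
--     return mergedDocument
-- ===== SOURCE B (Python) =====
-- def mergeDocuments(documents):
--     keys = dict.fromkeys(f for d in documents for f in d if f != "_id")
--     mergedDocument = {}
--     for field in keys:
--         values = []
--         for d in documents: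
--             if field in d:
--                 values += d[field]
--         mergedDocument[field] = values
--     return mergedDocument
-- ===== Notes on version B (the rewrite author's own statement) =====
-- stated objective: alternative
-- what changed: B first builds the ordered index of all field names across documents (dict.fromkeys), then fills each field's merged list by a per-field scan over all documents, instead of A's single forward pass growing a dict in place.
import Mathlib
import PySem

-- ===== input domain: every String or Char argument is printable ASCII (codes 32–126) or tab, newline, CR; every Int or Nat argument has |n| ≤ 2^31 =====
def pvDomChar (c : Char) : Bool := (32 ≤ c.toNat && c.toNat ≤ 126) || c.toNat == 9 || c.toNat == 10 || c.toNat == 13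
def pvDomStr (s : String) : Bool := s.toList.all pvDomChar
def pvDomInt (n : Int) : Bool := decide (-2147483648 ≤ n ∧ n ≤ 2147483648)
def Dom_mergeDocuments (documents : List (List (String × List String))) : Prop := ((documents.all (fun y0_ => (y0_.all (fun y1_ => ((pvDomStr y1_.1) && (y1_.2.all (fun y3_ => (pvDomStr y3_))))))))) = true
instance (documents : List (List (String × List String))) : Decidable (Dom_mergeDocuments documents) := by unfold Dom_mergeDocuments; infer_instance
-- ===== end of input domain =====

-- B builds the ordered index of field names first and then merges per field; same result, different pass structure.
-- Each Python document is a dict, represented here via PySem.Dict.ofList of its association list.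

-- ===== PORT A =====
def mergeDocuments (documents : List (List (String × List String))) : List (String × List String) :=
  (documents.foldl
    (fun mergedDocument document =>
      let d := PySem.Dict.ofList document
      d.keys.foldl
        (fun mergedDocument field =>
          if field == "_id" then mergedDocument
          else
            let m := if mergedDocument.contains field then mergedDocument
                     else mergedDocument.insert field ([] : List String)
            m.insert field (m.getD field [] ++ d.getD field []))
        mergedDocument)
    PySem.Dict.empty).items

-- ===== PORT B =====
def mergeDocuments_alt (documents : List (List (String × List String))) : List (String × List String) :=
  let keys : List String :=
    PySem.List.dedup
      ((documents.flatMap (fun document => (PySem.Dict.ofList document).keys)).filter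
        (fun f => !(f == "_id")))
  (keys.foldl
    (fun merged field =>
      merged.insert field
        (documents.foldl
          (fun values document =>
            let d := PySem.Dict.ofList document
            if d.contains field then values ++ d.getD field [] else values)
          ([] : List String)))
    PySem.Dict.empty).items

-- ===== PRECONDITION & SPEC =====
def Spec_mergeDocuments (documents : List (List (String × List String))) (out : List (String × List String)) : Prop := out = mergeDocuments_alt documents
instance (documents : List (List (String × List String))) (out : List (String × List String)) : Decidable (Spec_mergeDocuments documents out) := by unfold Spec_mergeDocuments; infer_instance

-- ===== CLAIM (what is proved, stated in full; the proofs are below) =====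
def Claim_equal_mergeDocuments : Prop := ∀ (documents : List (List (String × List String))), Dom_mergeDocuments documents → Spec_mergeDocuments documents (mergeDocuments documents)

-- ===== LEMMAS AND PROOFS =====

/-- B's inner per-field scan over all documents. -/
def pvColl (field : String) (ds : List (List (String × List String))) : List String :=
  ds.foldl
    (fun values document =>
      let d := PySem.Dict.ofList document
      if d.contains field then values ++ d.getD field [] else values)
    ([] : List String)

/-- B's ordered index of field names. -/
def pvKeys (ds : List (List (String × List String))) : List String :=
  PySem.List.dedup
    ((ds.flatMap (fun document => (PySem.Dict.ofList document).keys)).filter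
      (fun f => !(f == "_id")))

lemma pvColl_eq_flatMap (f : String) (ds : List (List (String × List String))) :
    pvColl f ds = ds.flatMap (fun doc =>
      if (PySem.Dict.ofList doc).contains f then (PySem.Dict.ofList doc).getD f [] else []) := by
  unfold pvColl
  have h : (fun (values : List String) (document : List (String × List String)) =>
        let d := PySem.Dict.ofList document
        if d.contains f then values ++ d.getD f [] else values)
      = fun values doc => values ++
          (if (PySem.Dict.ofList doc).contains f then (PySem.Dict.ofList doc).getD f [] else []) := by
    funext values doc
    by_cases h : (PySem.Dict.ofList doc).contains f <;> simp [h]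
  rw [h, PySem.List.foldl_append_eq_flatMap]
  simp

lemma pvColl_append (f : String) (ds : List (List (String × List String)))
    (doc : List (String × List String)) :
    pvColl f (ds ++ [doc]) = pvColl f ds ++
      (if (PySem.Dict.ofList doc).contains f then (PySem.Dict.ofList doc).getD f [] else []) := by
  simp [pvColl_eq_flatMap]

lemma pvColl_nil_of_not_contains (f : String) (ds : List (List (String × List String)))
    (h : ∀ doc ∈ ds, (PySem.Dict.ofList doc).contains f = false) : pvColl f ds = [] := by
  rw [pvColl_eq_flatMap, List.flatMap_eq_nil_iff]
  intro doc hd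
  simp [h doc hd]

lemma mem_pvKeys (f : String) (ds : List (List (String × List String))) :
    f ∈ pvKeys ds ↔ (¬ f = "_id" ∧ ∃ doc ∈ ds, (PySem.Dict.ofList doc).contains f = true) := by
  unfold pvKeys PySem.List.dedup
  rw [PySem.Set.mem_ofList]
  simp [List.mem_filter, List.mem_flatMap, PySem.Dict.contains_iff_mem_keys, and_comm]

lemma nodup_pvKeys (ds : List (List (String × List String))) : (pvKeys ds).Nodup :=
  PySem.Set.nodup_ofList _

lemma set_fold_add_nodup (ys : List String) : ∀ s : List String, ys.Nodup →
    List.foldl PySem.Set.add s ys = s ++ ys.filter (fun y => !s.contains y) := by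
  induction ys with
  | nil => intro s _; simp
  | cons y ys ih =>
    intro s hnd
    obtain ⟨hy, hnd'⟩ := List.nodup_cons.mp hnd
    rw [List.foldl_cons]
    by_cases hc : y ∈ s
    · rw [show PySem.Set.add s y = s from by simp [PySem.Set.add, PySem.Set.contains, hc]]
      rw [ih s hnd']
      simp [hc]
    · rw [show PySem.Set.add s y = s ++ [y] from by
        simp [PySem.Set.add, PySem.Set.contains, hc]]
      rw [ih _ hnd']
      rw [List.filter_cons, if_pos (by simp [hc])]
      rw [List.append_assoc, List.singleton_append]
      congr 2
      apply List.filter_congr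
      intro x hx
      have hxy : x ≠ y := fun h => hy (h ▸ hx)
      simp [hxy]

lemma pvKeys_append (ds : List (List (String × List String))) (doc : List (String × List String)) :
    pvKeys (ds ++ [doc]) = pvKeys ds ++
      ((PySem.Dict.ofList doc).keys.filter
        (fun f => !(f == "_id") && !((pvKeys ds).contains f))) := by
  unfold pvKeys PySem.List.dedup PySem.Set.ofList
  rw [List.flatMap_append, List.filter_append, List.foldl_append]
  simp only [List.flatMap_cons, List.flatMap_nil, List.append_nil]
  rw [set_fold_add_nodup _ _ (List.Nodup.filter _ (PySem.Dict.nodup_keys_ofList doc))]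
  simp [List.filter_filter, Bool.and_comm]

lemma items_map_keys (L : List String) (val : String → List String) :
    (PySem.Dict.mk (L.map (fun f => (f, val f)))).keys = L := by
  simp [PySem.Dict.keys_mk, List.map_map, Function.comp_def]

lemma contains_map_keys (L : List String) (val : String → List String) (k : String) :
    (PySem.Dict.mk (L.map (fun f => (f, val f)))).contains k = L.contains k := by
  simp only [PySem.Dict.contains_mk, List.any_map, Function.comp_def]
  exact List.any_beq'

/-- A's merged dict in "map form": keys `L`, value `val f` at each key. -/
def pvMk (L : List String) (val : String → List String) : PySem.Dict String (List String) :=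
  PySem.Dict.mk (L.map (fun f => (f, val f)))

/-- The body of A's inner loop over one document's fields (d = the current document). -/
def pvStepF (d : PySem.Dict String (List String)) :
    PySem.Dict String (List String) → String → PySem.Dict String (List String) :=
  fun mergedDocument field =>
    if field == "_id" then mergedDocument
    else
      let m := if mergedDocument.contains field then mergedDocument
               else mergedDocument.insert field ([] : List String)
      m.insert field (m.getD field [] ++ d.getD field [])

lemma pvStep_eq (d : PySem.Dict String (List String)) (L : List String)
    (val : String → List String) (k : String) (hL : L.Nodup) (hid : ¬ k = "_id") :
    pvStepF d (pvMk L val) k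
      = pvMk (if k ∈ L then L else L ++ [k])
          (fun f => if f = k then (if k ∈ L then val k else []) ++ d.getD k [] else val f) := by
  unfold pvStepF
  rw [if_neg (by simp [hid])]
  by_cases hkL : k ∈ L
  · have hcont : (pvMk L val).contains k = true := by
      unfold pvMk; rw [contains_map_keys]; simpa using hkL
    simp only [hcont, if_true, hkL]
    have hgd : (pvMk L val).getD k [] = val k := by
      apply PySem.Dict.getD_of_mem_items
      · exact List.mem_map_of_mem hkL
      · rw [show (pvMk L val).keys = L from items_map_keys L val]; exact hL
    rw [hgd]
    apply PySem.Dict.ext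
    rw [PySem.Dict.items_insert_of_contains _ _ hcont]
    unfold pvMk
    simp only [List.map_map]
    apply List.map_congr_left
    intro f hf
    by_cases hfk : f = k
    · subst hfk; simp [hkL]
    · simp [hfk]
  · have hcont : (pvMk L val).contains k = false := by
      unfold pvMk; rw [contains_map_keys]; simpa using hkL
    simp only [hcont, Bool.false_eq_true, if_false, hkL]
    rw [PySem.Dict.getD_insert_self, PySem.Dict.insert_insert_self]
    apply PySem.Dict.ext
    rw [PySem.Dict.items_insert_of_not_contains _ _ hcont]
    unfold pvMk
    rw [List.map_append]
    congr 1
    · apply List.map_congr_left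
      intro f hf
      have hfk : f ≠ k := fun h => hkL (h ▸ hf)
      simp [hfk]
    · simp

lemma pvStepFold (d : PySem.Dict String (List String)) :
    ∀ (ks : List String) (L : List String) (val : String → List String), ks.Nodup → L.Nodup →
    (ks.foldl (pvStepF d) (pvMk L val)).items
      = (L ++ ks.filter (fun f => !(f == "_id") && !(L.contains f))).map
          (fun f => (f, (if f ∈ L then val f else []) ++
            (if f ∈ ks ∧ ¬ f = "_id" then d.getD f [] else []))) := by
  intro ks
  induction ks with
  | nil =>
    intro L val _ _
    simp only [List.foldl_nil, List.filter_nil, List.append_nil]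
    show L.map (fun f => (f, val f)) = _
    apply List.map_congr_left
    intro f hf
    simp [hf]
  | cons k ks ih =>
    intro L val hnd hL
    obtain ⟨hk, hks⟩ := List.nodup_cons.mp hnd
    rw [List.foldl_cons]
    by_cases hid : k = "_id"
    · rw [show pvStepF d (pvMk L val) k = pvMk L val from by
        unfold pvStepF; rw [if_pos (by simp [hid])]]
      rw [ih L val hks hL, List.filter_cons, if_neg (by simp [hid])]
      apply List.map_congr_left
      intro f hf
      by_cases hfk : f = k
      · subst hfk; simp [hid]
      · simp [List.mem_cons, hfk]
    · rw [pvStep_eq d L val k hL hid]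
      by_cases hkL : k ∈ L
      · simp only [hkL, if_true]
        rw [ih L _ hks hL, List.filter_cons, if_neg (by simp [hkL])]
        apply List.map_congr_left
        intro f hf
        by_cases hfk : f = k
        · subst hfk; simp [hkL, hk, hid]
        · simp [hfk, List.mem_cons]
      · simp only [hkL, if_false]
        have hfeq : ks.filter (fun f => !(f == "_id") && !((L ++ [k]).contains f))
            = ks.filter (fun f => !(f == "_id") && !(L.contains f)) := by
          apply List.filter_congr
          intro x hx
          have hxk : x ≠ k := fun h => hk (h ▸ hx)
          simp [hxk]
        rw [ih (L ++ [k]) _ hks (by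
          rw [List.nodup_append]
          refine ⟨hL, List.nodup_singleton _, ?_⟩
          intro a ha b hb
          rw [List.mem_singleton] at hb
          subst hb
          exact fun h => hkL (h ▸ ha)), hfeq,
          List.filter_cons, if_pos (by simp [hid, hkL])]
        simp only [List.append_assoc, List.singleton_append]
        apply List.map_congr_left
        intro f hf
        by_cases hfk : f = k
        · subst hfk; simp [hkL, hk, hid, List.mem_append]
        · simp [hfk, List.mem_append, List.mem_cons]

lemma A_items (ds : List (List (String × List String))) :
    mergeDocuments ds = (pvKeys ds).map (fun f => (f, pvColl f ds)) := by
  induction ds using List.reverseRecOn with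
  | nil => rfl
  | append_singleton ds doc ih =>
    unfold mergeDocuments at ih ⊢
    have hdict : ds.foldl
        (fun mergedDocument document =>
          let d := PySem.Dict.ofList document
          d.keys.foldl
            (fun mergedDocument field =>
              if field == "_id" then mergedDocument
              else
                let m := if mergedDocument.contains field then mergedDocument
                         else mergedDocument.insert field ([] : List String)
                m.insert field (m.getD field [] ++ d.getD field []))
            mergedDocument)
        PySem.Dict.empty
        = pvMk (pvKeys ds) (fun f => pvColl f ds) := by
      apply PySem.Dict.ext
      exact ih
    rw [List.foldl_append, List.foldl_cons, List.foldl_nil, hdict]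
    show ((PySem.Dict.ofList doc).keys.foldl (pvStepF (PySem.Dict.ofList doc))
        (pvMk (pvKeys ds) (fun f => pvColl f ds))).items = _
    rw [pvStepFold (PySem.Dict.ofList doc) _ _ _ (PySem.Dict.nodup_keys_ofList doc)
      (nodup_pvKeys ds), pvKeys_append]
    apply List.map_congr_left
    intro f hf
    rcases List.mem_append.mp hf with hmem | hmem
    · obtain ⟨hfid, -⟩ := (mem_pvKeys f ds).mp hmem
      rw [pvColl_append]
      simp only [hmem, if_true]
      congr 1
      by_cases hcont : (PySem.Dict.ofList doc).contains f = true
      · simp [hcont, (PySem.Dict.contains_iff_mem_keys _ _).mp hcont, hfid]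
      · have hnk : f ∉ (PySem.Dict.ofList doc).keys :=
          fun h => hcont ((PySem.Dict.contains_iff_mem_keys _ _).mpr h)
        simp [hcont, hnk]
    · obtain ⟨hkeys, hpred⟩ := List.mem_filter.mp hmem
      have hfid : ¬ f = "_id" := by
        intro h; simp [h] at hpred
      have hnot : f ∉ pvKeys ds := by
        intro h
        simp [h] at hpred
      have hcoll : pvColl f ds = [] := by
        apply pvColl_nil_of_not_contains
        intro doc' hd'
        by_contra hc
        exact hnot ((mem_pvKeys f ds).mpr ⟨hfid, doc', hd', by simpa using hc⟩)
      rw [pvColl_append, hcoll]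
      have hcont : (PySem.Dict.ofList doc).contains f = true :=
        (PySem.Dict.contains_iff_mem_keys _ _).mpr hkeys
      simp [hnot, hcont, hkeys, hfid]

lemma B_items (ds : List (List (String × List String))) :
    mergeDocuments_alt ds = (pvKeys ds).map (fun f => (f, pvColl f ds)) := by
  unfold mergeDocuments_alt
  have h := PySem.Dict.items_foldl_insert_fresh (κ := String) (ν := List String)
      (pvKeys ds) (fun f => f) (fun f => pvColl f ds) PySem.Dict.empty
      (fun a _ => PySem.Dict.contains_empty a)
      (by simpa using nodup_pvKeys ds)
  simp only [pvKeys, pvColl] at h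
  simpa [PySem.Dict.empty] using h

-- ===== VERDICT (by name: the statement is the Claim_ definition above) =====
theorem mergeDocuments_spec : Claim_equal_mergeDocuments := by
  intro documents _
  unfold Spec_mergeDocuments
  rw [A_items, B_items]
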